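-- pv_equiv track=rewrite | github.com/michael-howell-island/codesurface | src/codesurface/parsers/typescript.py | _remove_default
-- ===== SOURCE A (Python) =====
-- def _remove_default(type_str: str) -> str:
--     """Remove default value from a type annotation, respecting brackets."""
--     depth = 0
--     for j, ch in enumerate(type_str):
--         if ch in ("<", "(", "[", "{"):
--             depth += 1
--         elif ch in (">", ")", "]", "}"):
--             depth -= 1
--         elif ch == "=" and depth == 0:
--             return type_str[:j].strip()
--     return type_str.strip()
-- ===== SOURCE B (Python) =====
-- def _remove_default(type_str: str) -> str:
--     """Remove default value from a type annotation, respecting brackets.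
--
--     Instead of a single depth-tracking scan, locate candidate '=' signs with
--     str.find (a C-level scan) and check bracket balance of the prefix before each one.
--     """
--     start = 0
--     while True:
--         idx = type_str.find("=", start)
--         if idx == -1:
--             return type_str.strip()
--         prefix = type_str[:idx]
--         opens = sum(1 for ch in prefix if ch in "<([{")
--         closes = sum(1 for ch in prefix if ch in ">)]}")
--         if opens == closes:
--             return prefix.strip()
--         start = idx + 1
-- ===== Notes on version B (the rewrite author's own statement) =====
-- stated objective: faster
-- what changed: Replaces the single depth-tracking character scan with repeated str.find jumps to candidate positions, checking bracket balance of the prefix (opens == closes) at each candidate instead of maintaining a running depth.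
import Mathlib
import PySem

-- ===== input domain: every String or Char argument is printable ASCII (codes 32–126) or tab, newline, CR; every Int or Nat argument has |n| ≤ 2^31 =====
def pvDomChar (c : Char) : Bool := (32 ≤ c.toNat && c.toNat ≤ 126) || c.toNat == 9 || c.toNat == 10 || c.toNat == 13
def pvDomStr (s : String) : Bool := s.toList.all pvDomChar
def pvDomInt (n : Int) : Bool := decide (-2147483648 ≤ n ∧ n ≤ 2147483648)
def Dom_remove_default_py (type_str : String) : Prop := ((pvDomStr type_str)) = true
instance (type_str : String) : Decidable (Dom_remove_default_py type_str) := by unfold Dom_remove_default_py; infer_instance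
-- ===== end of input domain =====

-- B replaces A's single depth-tracking scan by repeated find('=', start) jumps with a
-- bracket-balance check of each candidate prefix (measured faster: the scan runs in C-level str.find).


-- shared character classes: ch in ("<","(","[","{") / ch in (">",")","]","}") (and B's 'ch in "<([{"')
def pvIsOpen (c : Char) : Bool := c == '<' || c == '(' || c == '[' || c == '{'
def pvIsClose (c : Char) : Bool := c == '>' || c == ')' || c == ']' || c == '}'

-- ===== PORT A =====
-- the 'for j, ch in enumerate(type_str)' loop; cs is the full type_str, rest = cs.drop j
def remAGo (cs : List Char) : List Char → Nat → Int → List Char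
  | [], _, _ => PySem.Chars.strip cs                                     -- return type_str.strip()
  | ch :: rest, j, depth =>
    if pvIsOpen ch then remAGo cs rest (j+1) (depth+1)
    else if pvIsClose ch then remAGo cs rest (j+1) (depth-1)
    else if ch == '=' && depth == 0 then PySem.Chars.strip (cs.take j)   -- type_str[:j].strip(), 0 ≤ j ≤ len
    else remAGo cs rest (j+1) depth

def remove_default_py (type_str : String) : String :=
  String.ofList (remAGo type_str.toList type_str.toList 0 0)

-- ===== PORT B =====
-- helper lemma the port's termination proof cites
theorem pvFindFrom_bounds (s : String) (k : Nat)
    (h : PySem.Str.findFrom s "=" (k : Int) none ≠ -1) :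
    k ≤ (PySem.Str.findFrom s "=" (k : Int) none).toNat ∧
    (PySem.Str.findFrom s "=" (k : Int) none).toNat < s.toList.length := by
  rw [PySem.Str.findFrom_eq] at *
  by_cases hk : k ≤ s.toList.length
  · obtain ⟨h1, h2, _⟩ := PySem.Chars.findFrom_natCast_spec s.toList "=".toList k hk h
    have hlen : ("=".toList : List Char).length ≤
        (List.drop (PySem.Chars.findFrom s.toList "=".toList (k : Int)).toNat s.toList).length :=
      h2.length_le
    simp only [List.length_drop] at hlen
    constructor
    · omega
    · have : ("=".toList : List Char).length = 1 := rfl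
      omega
  · exfalso
    apply h
    have hneg : ¬ ((k : Int) < 0) := by omega
    simp only [PySem.Chars.findFrom, hneg, if_false]
    rw [if_pos (show ((s.toList.length : Int)) < (k : Int) by omega)]

-- the 'while True' loop of Source B, on the running start index
def altGo (s : String) (start : Nat) : List Char :=
  if h : PySem.Str.findFrom s "=" (start : Int) none = -1 then
    PySem.Chars.strip s.toList                                           -- return type_str.strip()
  else
    let idx := (PySem.Str.findFrom s "=" (start : Int) none).toNat
    let pre := s.toList.take idx                                         -- prefix = type_str[:idx], idx ≥ 0
    if pre.countP (fun c => pvIsOpen c) = pre.countP (fun c => pvIsClose c) then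
      PySem.Chars.strip pre                                              -- return prefix.strip()
    else altGo s (idx + 1)                                               -- start = idx + 1
termination_by s.toList.length - start
decreasing_by
  have := pvFindFrom_bounds s start h
  omega

def remove_default_py_alt (type_str : String) : String :=
  String.ofList (altGo type_str 0)

-- ===== PRECONDITION & SPEC =====
def Spec_remove_default_py (type_str : String) (out : String) : Prop := out = remove_default_py_alt type_str
instance (type_str : String) (out : String) : Decidable (Spec_remove_default_py type_str out) := by unfold Spec_remove_default_py; infer_instance

-- ===== CLAIM (what is proved, stated in full; the proofs are below) =====
def Claim_equal_remove_default_py : Prop := ∀ (type_str : String), Dom_remove_default_py type_str → Spec_remove_default_py type_str (remove_default_py type_str)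

-- ===== LEMMAS AND PROOFS =====

-- reference scan both ports are reduced to: first j ≥ start with cs[j] = '=' and a balanced prefix
def pvRef (cs : List Char) : List Char → Nat → List Char
  | [], _ => PySem.Chars.strip cs
  | c :: rest, j =>
    if c = '=' ∧ (cs.take j).countP (fun c => pvIsOpen c) = (cs.take j).countP (fun c => pvIsClose c)
    then PySem.Chars.strip (cs.take j)
    else pvRef cs rest (j+1)

theorem pvSingleton_prefix_iff (c : Char) (l : List Char) : [c] <+: l ↔ l.head? = some c := by
  cases l <;> simp [List.cons_prefix_iff]

theorem pvPrefix_drop_iff (c : Char) (l : List Char) (i : Nat) :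
    [c] <+: l.drop i ↔ l[i]? = some c := by
  rw [pvSingleton_prefix_iff, List.head?_drop]


theorem pvOpen_facts (c : Char) (h : pvIsOpen c = true) : pvIsClose c = false ∧ c ≠ '=' := by
  simp only [pvIsOpen, Bool.or_eq_true, beq_iff_eq] at h
  rcases h with ((rfl | rfl) | rfl) | rfl <;> exact ⟨rfl, by decide⟩

theorem pvClose_facts (c : Char) (h : pvIsClose c = true) : c ≠ '=' := by
  simp only [pvIsClose, Bool.or_eq_true, beq_iff_eq] at h
  rcases h with ((rfl | rfl) | rfl) | rfl <;> decide

-- A = reference scan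
theorem pvA_eq_ref (cs : List Char) (rest : List Char) (j : Nat) (depth : Int)
    (hdrop : cs.drop j = rest)
    (hdepth : depth = ((cs.take j).countP (fun c => pvIsOpen c) : Int) - (cs.take j).countP (fun c => pvIsClose c)) :
    remAGo cs rest j depth = pvRef cs rest j := by
  induction rest generalizing j depth with
  | nil => simp [remAGo, pvRef]
  | cons ch rest ih =>
    have hj : j < cs.length := by
      by_contra hle
      rw [List.drop_eq_nil_of_le (by omega)] at hdrop
      exact List.cons_ne_nil _ _ hdrop.symm
    have hget : cs[j] = ch := by
      have h2 := List.drop_eq_getElem_cons hj (l := cs)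
      rw [hdrop] at h2
      exact (List.cons.injEq _ _ _ _ ▸ h2).1.symm
    have hdrop' : cs.drop (j+1) = rest := by
      have h2 := List.drop_eq_getElem_cons hj (l := cs)
      rw [hdrop] at h2
      exact (List.cons.injEq _ _ _ _ ▸ h2).2.symm
    have htake : cs.take (j+1) = cs.take j ++ [ch] := by
      rw [List.take_add_one, List.getElem?_eq_getElem hj, hget]
      rfl
    by_cases ho : pvIsOpen ch = true
    · obtain ⟨hcl, hne⟩ := pvOpen_facts ch ho
      rw [remAGo, pvRef, if_pos ho, if_neg (by tauto)]
      exact ih (j+1) (depth+1) hdrop'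
        (by rw [htake]; simp [List.countP_append, ho, hcl]; omega)
    · have ho' : pvIsOpen ch = false := by simpa using ho
      by_cases hc : pvIsClose ch = true
      · have hne := pvClose_facts ch hc
        rw [remAGo, pvRef, if_neg (by simp [ho']), if_pos hc, if_neg (by tauto)]
        exact ih (j+1) (depth-1) hdrop'
          (by rw [htake]; simp [List.countP_append, ho', hc]; omega)
      · have hc' : pvIsClose ch = false := by simpa using hc
        by_cases he : ch = '='
        · by_cases hd : depth = 0
          · rw [remAGo, pvRef, if_neg (by simp [ho']), if_neg (by simp [hc']),
                if_pos (by simp [he, hd]), if_pos ⟨he, by omega⟩]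
          · rw [remAGo, pvRef, if_neg (by simp [ho']), if_neg (by simp [hc']),
                if_neg (by simp [he]; omega), if_neg (by rintro ⟨_, hcnt⟩; omega)]
            exact ih (j+1) depth hdrop'
              (by rw [htake]; simp [List.countP_append, ho', hc']; omega)
        · rw [remAGo, pvRef, if_neg (by simp [ho']), if_neg (by simp [hc']),
              if_neg (by simp [he]), if_neg (by tauto)]
          exact ih (j+1) depth hdrop'
            (by rw [htake]; simp [List.countP_append, ho', hc']; omega)

-- skipping a non-'=' character does not change what find('=', start) returns
theorem pvFindFrom_skip (s : String) (k : Nat) (hk : k < s.toList.length)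
    (hc : s.toList[k]? ≠ some '=') :
    PySem.Str.findFrom s "=" (k : Int) none = PySem.Str.findFrom s "=" ((k+1 : Nat) : Int) none := by
  rw [PySem.Str.findFrom_eq, PySem.Str.findFrom_eq]
  have hk1 : k + 1 ≤ s.toList.length := hk
  by_cases h1 : PySem.Chars.findFrom s.toList "=".toList (k : Int) = -1
  · rw [h1]
    symm
    rw [PySem.Chars.findFrom_natCast_eq_neg_one_iff _ _ _ hk1]
    rw [PySem.Chars.findFrom_natCast_eq_neg_one_iff _ _ _ (by omega : k ≤ s.toList.length)] at h1
    intro hinf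
    apply h1
    have hsub : s.toList.drop (k+1) <:+ s.toList.drop k := by
      rw [List.drop_eq_getElem_cons hk]
      exact List.suffix_cons _ _
    exact hinf.trans hsub.isInfix
  · obtain ⟨hge, hpre, hmin⟩ :=
      PySem.Chars.findFrom_natCast_spec s.toList "=".toList k (by omega) h1
    set F : Int := PySem.Chars.findFrom s.toList "=".toList (k : Int) with hF
    have hFnn : 0 ≤ F := le_trans (by omega) hge
    have hFk : F.toNat ≠ k := by
      intro heq
      rw [heq, show ("=".toList : List Char) = ['='] from rfl, pvPrefix_drop_iff] at hpre
      exact hc hpre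
    have hFge : k + 1 ≤ F.toNat := by omega
    have h2 : PySem.Chars.findFrom s.toList "=".toList ((k+1 : Nat) : Int) ≠ -1 := by
      intro hEq
      rw [PySem.Chars.findFrom_natCast_eq_neg_one_iff _ _ _ hk1] at hEq
      apply hEq
      have hpre2 : ("=".toList : List Char) <+: (s.toList.drop (k+1)).drop (F.toNat - (k+1)) := by
        have harith : k + 1 + (F.toNat - (k+1)) = F.toNat := by omega
        rw [List.drop_drop, harith]
        exact hpre
      exact (PySem.Chars.isIn_iff_infix _ _).mp
        ((PySem.Chars.exists_prefix_drop_iff_isIn _ _).mp ⟨_, hpre2⟩)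
    obtain ⟨hge', hpre', hmin'⟩ :=
      PySem.Chars.findFrom_natCast_spec s.toList "=".toList (k+1) hk1 h2
    set F' : Int := PySem.Chars.findFrom s.toList "=".toList ((k+1 : Nat) : Int) with hF'
    have hF'nn : 0 ≤ F' := le_trans (by omega) hge'
    have hle1 : ¬ (F.toNat < F'.toNat) := fun hlt => hmin' F.toNat hFge hlt hpre
    have hle2 : ¬ (F'.toNat < F.toNat) := fun hlt => hmin F'.toNat (by omega) hlt hpre'
    omega

-- B = reference scan
theorem pvB_eq_ref (s : String) (start : Nat) (rest : List Char)
    (hdrop : s.toList.drop start = rest) (hle : start ≤ s.toList.length) :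
    altGo s start = pvRef s.toList rest start := by
  induction rest generalizing start with
  | nil =>
    have hnone : PySem.Str.findFrom s "=" (start : Int) none = -1 := by
      rw [PySem.Str.findFrom_eq, PySem.Chars.findFrom_natCast_eq_neg_one_iff _ _ _ hle, hdrop]
      simp
    rw [altGo, dif_pos hnone, pvRef]
  | cons c rest ih =>
    have hlt : start < s.toList.length := by
      by_contra hge
      rw [List.drop_eq_nil_of_le (by omega)] at hdrop
      exact List.cons_ne_nil _ _ hdrop.symm
    have hget' : s.toList[start] = c := by
      have h2 := List.drop_eq_getElem_cons hlt (l := s.toList)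
      rw [hdrop] at h2
      exact (List.cons.injEq _ _ _ _ ▸ h2).1.symm
    have hget : s.toList[start]? = some c := by
      rw [List.getElem?_eq_getElem hlt, hget']
    have hdrop' : s.toList.drop (start+1) = rest := by
      have h2 := List.drop_eq_getElem_cons hlt (l := s.toList)
      rw [hdrop] at h2
      exact (List.cons.injEq _ _ _ _ ▸ h2).2.symm
    by_cases hc : c = '='
    · -- '=' found right at start
      have hpre : ("=".toList : List Char) <+: s.toList.drop start := by
        rw [show ("=".toList : List Char) = ['='] from rfl, pvPrefix_drop_iff, hget, hc]
      have hne : PySem.Str.findFrom s "=" (start : Int) none ≠ -1 := by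
        intro hEq
        rw [PySem.Str.findFrom_eq,
            PySem.Chars.findFrom_natCast_eq_neg_one_iff _ _ _ hle] at hEq
        exact hEq hpre.isInfix
      obtain ⟨hge, _, hmin⟩ := PySem.Chars.findFrom_natCast_spec s.toList "=".toList start hle
        (by rw [PySem.Str.findFrom_eq] at hne; exact hne)
      have hFnn : (0 : Int) ≤ PySem.Chars.findFrom s.toList "=".toList (start : Int) :=
        le_trans (by omega) hge
      have hFeq : (PySem.Str.findFrom s "=" (start : Int) none).toNat = start := by
        rw [PySem.Str.findFrom_eq]
        by_contra hne'
        exact hmin start le_rfl (by omega) hpre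
      rw [altGo, dif_neg hne]
      simp only [hFeq]
      rw [pvRef]
      by_cases hbal : (s.toList.take start).countP (fun c => pvIsOpen c) =
          (s.toList.take start).countP (fun c => pvIsClose c)
      · rw [if_pos hbal, if_pos ⟨hc, hbal⟩]
      · rw [if_neg hbal, if_neg (by rintro ⟨_, h⟩; exact hbal h)]
        exact ih (start+1) hdrop' (by omega)
    · -- skip the non-'=' character at start
      have hcne : s.toList[start]? ≠ some '=' := by rw [hget]; simp [hc]
      have hskip := pvFindFrom_skip s start hlt hcne
      have hstep : altGo s start = altGo s (start+1) := by
        conv_lhs => rw [altGo]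
        conv_rhs => rw [altGo]
        simp only [hskip]
      rw [hstep, pvRef, if_neg (by tauto)]
      exact ih (start+1) hdrop' (by omega)

-- ===== VERDICT (by name: the statement is the Claim_ definition above) =====
theorem remove_default_py_spec : Claim_equal_remove_default_py := by
  intro s _
  unfold Spec_remove_default_py remove_default_py remove_default_py_alt
  rw [pvA_eq_ref s.toList s.toList 0 0 (by simp) (by simp),
      pvB_eq_ref s 0 s.toList (by simp) (by simp)]
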